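-- pv_equiv track=rewrite | github.com/mohitsharma0690/multi_scale_head_gesture | utils/visualize_gest_len.py | get_gesture_seq_len
-- ===== SOURCE A (Python) =====
-- NUM_CLASSES = 11
--
-- MAX_SLIDING_WINDOW = 500
--
-- def get_gesture_seq_len(a):
--   i, seq_len = 0, len(a)
--   gest_seq_len = [[] for i in range(NUM_CLASSES)]
--
--   while i < seq_len:
--     j, target_gest = i+1, a[i]
--     while j < seq_len and a[j] == a[i] and j-i < MAX_SLIDING_WINDOW:
--       j = j + 1
--     # define a minimum length for a gesture
--     if j - i > 5:
--       gest_seq_len[a[i]].append(j-i)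
--     i = j
--
--   return gest_seq_len
-- ===== SOURCE B (Python) =====
-- from itertools import groupby
--
-- NUM_CLASSES = 11
--
-- MAX_SLIDING_WINDOW = 500
--
--
-- def get_gesture_seq_len(a):
--   gest_seq_len = [[] for _ in range(NUM_CLASSES)]
--   for key, grp in groupby(a):
--     full, rem = divmod(sum(1 for _ in grp), MAX_SLIDING_WINDOW)
--     for _ in range(full):
--       gest_seq_len[key].append(MAX_SLIDING_WINDOW)
--     if rem > 5:
--       gest_seq_len[key].append(rem)
--   return gest_seq_len
-- ===== Notes on version B (the rewrite author's own statement) =====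
-- stated objective: idiomatic
-- what changed: Replaces the index-based nested while loops (inner rescan per capped chunk) with an itertools.groupby pass over maximal runs, splitting each run length arithmetically via divmod into 500-chunks plus a >5 remainder.
import Mathlib
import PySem

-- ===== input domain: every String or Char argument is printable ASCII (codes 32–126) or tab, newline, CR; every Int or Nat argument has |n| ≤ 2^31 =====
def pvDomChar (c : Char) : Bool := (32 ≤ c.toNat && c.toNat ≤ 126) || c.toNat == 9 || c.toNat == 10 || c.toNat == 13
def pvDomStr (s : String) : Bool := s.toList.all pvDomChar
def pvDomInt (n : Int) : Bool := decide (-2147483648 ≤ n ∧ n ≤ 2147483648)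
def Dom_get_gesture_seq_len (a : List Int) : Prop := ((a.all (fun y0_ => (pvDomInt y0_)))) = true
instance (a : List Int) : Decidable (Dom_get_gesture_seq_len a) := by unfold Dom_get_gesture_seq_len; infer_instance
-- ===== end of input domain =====

-- B replaces A's index-based nested while loops by a groupby-over-runs pass with divmod chunking (idiomatic, same cost).

-- ===== PORT A =====
-- Python `gest_seq_len[k].append(v)` with possibly negative k (Python wraparound); no-op branch is unreachable under Pre_.
def appendAtA (g : List (List Int)) (k v : Int) : List (List Int) :=
  let n : Int := if k < 0 then k + g.length else k
  if 0 ≤ n ∧ n < g.length then g.modify n.toNat (fun l => l ++ [v]) else g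

-- inner while: `while j < seq_len and a[j] == a[i] and j-i < MAX_SLIDING_WINDOW: j += 1`
def innerA (a : List Int) (n i j : Nat) : Nat :=
  if j < n ∧ a.getD j 0 = a.getD i 0 ∧ j - i < 500 then innerA a n i (j + 1) else j
termination_by n - j
decreasing_by omega

-- needed for outerA's termination
theorem innerA_ge (a : List Int) (n i j : Nat) : j ≤ innerA a n i j := by
  unfold innerA
  split
  · have := innerA_ge a n i (j + 1); omega
  · omega
termination_by n - j
decreasing_by omega

-- outer while over i
def outerA (a : List Int) (n i : Nat) (g : List (List Int)) : List (List Int) :=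
  if i < n then
    let j := innerA a n i (i + 1)
    let g' := if 5 < j - i then appendAtA g (a.getD i 0) ((j - i : Nat) : Int) else g
    outerA a n j g'
  else g
termination_by n - i
decreasing_by have := innerA_ge a n i (i + 1); omega

def get_gesture_seq_len (a : List Int) : List (List Int) :=
  outerA a a.length 0 (List.replicate 11 [])

-- ===== PORT B =====
def appendAtB (g : List (List Int)) (k v : Int) : List (List Int) :=
  let n : Int := if k < 0 then k + g.length else k
  if 0 ≤ n ∧ n < g.length then g.modify n.toNat (fun l => l ++ [v]) else g

-- itertools.groupby: list of (key, run length) of maximal consecutive equal runs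
def bGroup : List Int → List (Int × Nat)
  | [] => []
  | x :: t => (x, 1 + (t.takeWhile (· == x)).length) :: bGroup (t.dropWhile (· == x))
termination_by l => l.length
decreasing_by
  have := List.length_dropWhile_le (· == x) t
  simp; omega

-- loop body: divmod into full 500-chunks and a >5 remainder
def bProcess (g : List (List Int)) (x : Int) (L : Nat) : List (List Int) :=
  let full := L / 500
  let rem := L % 500
  let g1 := (List.range full).foldl (fun h _ => appendAtB h x 500) g
  if 5 < rem then appendAtB g1 x (rem : Int) else g1

def get_gesture_seq_len_alt (a : List Int) : List (List Int) :=
  (bGroup a).foldl (fun g kr => bProcess g kr.1 kr.2) (List.replicate 11 [])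

-- ===== PRECONDITION & SPEC =====
-- Pre_ excludes exactly the inputs where Python A raises IndexError: a run of more than 5
-- consecutive equal values whose value is outside the wraparound-indexable range [-11, 11).
def Pre_get_gesture_seq_len (a : List Int) : Prop :=
  ∀ i ∈ List.range a.length, i + 5 < a.length →
    (∀ k ∈ List.range 5, a.getD (i + k + 1) 0 = a.getD i 0) →
    (-11 ≤ a.getD i 0 ∧ a.getD i 0 < 11)
instance (a : List Int) : Decidable (Pre_get_gesture_seq_len a) := by
  unfold Pre_get_gesture_seq_len; infer_instance

def pvWitness_get_gesture_seq_len : List Int := [1, 1, 1, 1, 1, 1, 1, 0, 2, 2]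

def Spec_get_gesture_seq_len (a : List Int) (out : List (List Int)) : Prop := out = get_gesture_seq_len_alt a
instance (a : List Int) (out : List (List Int)) : Decidable (Spec_get_gesture_seq_len a out) := by unfold Spec_get_gesture_seq_len; infer_instance

-- ===== CLAIM (what is proved, stated in full; the proofs are below) =====
def Claim_equal_get_gesture_seq_len : Prop := ∀ (a : List Int), Dom_get_gesture_seq_len a → Pre_get_gesture_seq_len a → Spec_get_gesture_seq_len a (get_gesture_seq_len a)

-- ===== LEMMAS AND PROOFS =====

theorem appendAtB_eq : appendAtB = appendAtA := rfl

-- counts how far A's inner loop advances through l, chunk offset d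
def scanC (x : Int) : List Int → Nat → Nat
  | [], _ => 0
  | y :: t, d => if y = x ∧ d < 500 then scanC x t (d + 1) + 1 else 0

theorem innerA_eq_scan (a : List Int) (i j : Nat) (hij : i < j) :
    innerA a a.length i j = j + scanC (a.getD i 0) (a.drop j) (j - i) := by
  unfold innerA
  by_cases hjn : j < a.length
  · have hdrop : a.drop j = a.getD j 0 :: a.drop (j + 1) := by
      rw [List.drop_eq_getElem_cons hjn, List.getD_eq_getElem?_getD, List.getElem?_eq_getElem hjn]
      simp
    rw [hdrop]
    simp only [scanC]
    by_cases heq : a.getD j 0 = a.getD i 0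
    · by_cases hd : j - i < 500
      · rw [if_pos ⟨hjn, heq, hd⟩, if_pos ⟨heq, hd⟩,
          innerA_eq_scan a i (j + 1) (by omega)]
        have h1 : j + 1 - i = j - i + 1 := by omega
        rw [h1]; omega
      · rw [if_neg (by tauto), if_neg (by tauto)]; omega
    · rw [if_neg (by tauto), if_neg (by tauto)]; omega
  · rw [if_neg (by tauto)]
    have hnil : a.drop j = [] := List.drop_eq_nil_of_le (by omega)
    simp [hnil, scanC]
termination_by a.length - j
decreasing_by omega

-- A's loop rephrased over the suffix list
def procA : List Int → List (List Int) → List (List Int)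
  | [], g => g
  | x :: t, g =>
    let c := scanC x t 1 + 1
    procA (t.drop (c - 1)) (if 5 < c then appendAtA g x (c : Int) else g)
termination_by l => l.length
decreasing_by simp only [List.length_drop, List.length_cons]; omega

theorem outerA_eq_procA (a : List Int) (i : Nat) (g : List (List Int)) :
    outerA a a.length i g = procA (a.drop i) g := by
  unfold outerA
  by_cases hi : i < a.length
  · rw [if_pos hi]
    have hdrop : a.drop i = a.getD i 0 :: a.drop (i + 1) := by
      rw [List.drop_eq_getElem_cons hi, List.getD_eq_getElem?_getD, List.getElem?_eq_getElem hi]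
      simp
    have hj : innerA a a.length i (i + 1)
        = (i + 1) + scanC (a.getD i 0) (a.drop (i + 1)) 1 := by
      have := innerA_eq_scan a i (i + 1) (by omega)
      simpa using this
    rw [hdrop]
    simp only [procA, hj]
    set s := scanC (a.getD i 0) (a.drop (i + 1)) 1 with hs
    have hsub : i + 1 + s - i = s + 1 := by omega
    rw [hsub]
    have hdd : (a.drop (i + 1)).drop (s + 1 - 1) = a.drop (i + 1 + s) := by
      rw [List.drop_drop]; congr 1
    rw [hdd]
    exact outerA_eq_procA a (i + 1 + s) _
  · rw [if_neg hi]
    have hnil : a.drop i = [] := List.drop_eq_nil_of_le (by omega)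
    rw [hnil]
    simp [procA]
termination_by a.length - i
decreasing_by have := innerA_ge a a.length i (i + 1); omega

-- A's processing of one whole run of length m, chunk by chunk
def chunkA (x : Int) (m : Nat) (g : List (List Int)) : List (List Int) :=
  if m = 0 then g
  else if m <= 500 then (if 5 < m then appendAtA g x (m : Int) else g)
  else chunkA x (m - 500) (appendAtA g x 500)
termination_by m

theorem chunkA_small (x : Int) (m : Nat) (h0 : m ≠ 0) (h : m ≤ 500) (g : List (List Int)) :
    chunkA x m g = if 5 < m then appendAtA g x (m : Int) else g := by
  unfold chunkA; rw [if_neg h0, if_pos h]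

theorem chunkA_big (x : Int) (m : Nat) (h : 500 < m) (g : List (List Int)) :
    chunkA x m g = chunkA x (m - 500) (appendAtA g x 500) := by
  conv_lhs => unfold chunkA
  rw [if_neg (by omega), if_neg (by omega)]

theorem procA_cons (x : Int) (t : List Int) (g : List (List Int)) :
    procA (x :: t) g = procA (t.drop (scanC x t 1 + 1 - 1))
      (if 5 < scanC x t 1 + 1 then appendAtA g x ((scanC x t 1 + 1 : Nat) : Int) else g) := by
  simp only [procA]

theorem takeWhile_eq_replicate (x : Int) (t : List Int) :
    t.takeWhile (· == x) = List.replicate (t.takeWhile (· == x)).length x := by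
  induction t with
  | nil => simp
  | cons y s ih =>
    by_cases h : y = x
    · subst h; simp only [List.takeWhile_cons, beq_self_eq_true, if_true]
      simp [List.replicate_succ, ← ih]
    · simp [h]

theorem dropWhile_head_ne (x : Int) (t : List Int) :
    ∀ y s, t.dropWhile (· == x) = y :: s → y ≠ x := by
  induction t with
  | nil => intro y s h; simp at h
  | cons z u ih =>
    intro y s h
    by_cases hz : z = x
    · subst hz; simp only [List.dropWhile_cons, beq_self_eq_true, if_true] at h; exact ih y s h
    · simp only [List.dropWhile_cons, beq_iff_eq, if_neg hz] at h
      injection h with h1 h2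
      subst h1; exact hz

theorem scanC_rep (x : Int) (k : Nat) (rest : List Int)
    (hrest : ∀ y s, rest = y :: s → y ≠ x) :
    ∀ d, d ≤ 500 → scanC x (List.replicate k x ++ rest) d = min k (500 - d) := by
  induction k with
  | zero =>
    intro d hd
    simp only [List.replicate, List.nil_append]
    cases hr : rest with
    | nil => simp [scanC]
    | cons y s => simp [scanC, hrest y s hr]
  | succ k ih =>
    intro d hd
    simp only [List.replicate_succ, List.cons_append, scanC]
    split_ifs with hc
    · rw [ih (d + 1) (by omega)]; omega
    · simp at hc
      omega

theorem drop_replicate_append (x : Int) (k n : Nat) (rest : List Int) (h : k ≤ n) :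
    (List.replicate n x ++ rest).drop k = List.replicate (n - k) x ++ rest := by
  rw [List.drop_append, List.length_replicate, List.drop_replicate]
  have h2 : k - n = 0 := by omega
  rw [h2, List.drop_zero]

theorem procA_run (x : Int) (m : Nat) (rest : List Int)
    (hrest : ∀ y s, rest = y :: s → y ≠ x) (g : List (List Int)) :
    procA (List.replicate m x ++ rest) g = procA rest (chunkA x m g) := by
  match m with
  | 0 => simp [chunkA]
  | Nat.succ m' =>
    rw [List.replicate_succ, List.cons_append, procA_cons,
      scanC_rep x m' rest hrest 1 (by omega)]
    by_cases hle : m' + 1 ≤ 500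
    · have hmin : min m' (500 - 1) = m' := by omega
      rw [hmin, chunkA_small x (m' + 1) (by omega) hle]
      have hdrop : (List.replicate m' x ++ rest).drop (m' + 1 - 1) = rest := by
        have := drop_replicate_append x m' m' rest (le_refl m')
        simpa using this
      rw [hdrop]
    · have hmin : min m' (500 - 1) = 499 := by omega
      rw [hmin]
      have hdrop : (List.replicate m' x ++ rest).drop (499 + 1 - 1)
          = List.replicate (m' + 1 - 500) x ++ rest := by
        have := drop_replicate_append x 499 m' rest (by omega)
        have h2 : m' - 499 = m' + 1 - 500 := by omega
        rw [h2] at this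
        simpa using this
      rw [hdrop, show (499 : Nat) + 1 = 500 from rfl, if_pos (by omega),
        procA_run x (m' + 1 - 500) rest hrest]
      have hcast : ((500 : Nat) : Int) = (500 : Int) := by norm_num
      rw [hcast, ← chunkA_big x (m' + 1) (by omega)]
  termination_by m
  decreasing_by omega

theorem range_foldl_iterate (F : List (List Int) → List (List Int)) (n : Nat) (g : List (List Int)) :
    (List.range n).foldl (fun h _ => F h) g = F^[n] g := by
  induction n generalizing g with
  | zero => simp
  | succ n ih =>
    rw [List.range_succ, List.foldl_append, ih]
    simp [Function.iterate_succ_apply']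

theorem chunkA_eq_bProcess (x : Int) (m : Nat) (g : List (List Int)) :
    chunkA x m g = bProcess g x m := by
  by_cases h0 : m = 0
  · subst h0
    simp [chunkA, bProcess]
  · by_cases hle : m ≤ 500
    · rw [chunkA_small x m h0 hle]
      by_cases h500 : m = 500
      · subst h500
        simp [bProcess, appendAtB_eq]
      · have hdiv : m / 500 = 0 := Nat.div_eq_of_lt (by omega)
        have hmod : m % 500 = m := Nat.mod_eq_of_lt (by omega)
        simp only [bProcess, hdiv, hmod, appendAtB_eq, List.range_zero, List.foldl_nil]
    · rw [chunkA_big x m (by omega), chunkA_eq_bProcess x (m - 500)]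
      have hmod : (m - 500) % 500 = m % 500 := by omega
      have hdiv : m / 500 = (m - 500) / 500 + 1 := by omega
      simp only [bProcess, range_foldl_iterate, appendAtB_eq, hmod, hdiv,
        Function.iterate_succ_apply]
  termination_by m
  decreasing_by omega

theorem bGroup_cons (x : Int) (t : List Int) :
    bGroup (x :: t) = (x, 1 + (t.takeWhile (· == x)).length) :: bGroup (t.dropWhile (· == x)) := by
  simp only [bGroup]

theorem procA_eq_foldl (l : List Int) (g : List (List Int)) :
    procA l g = (bGroup l).foldl (fun g kr => bProcess g kr.1 kr.2) g := by
  match l with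
  | [] => simp [procA, bGroup]
  | x :: t =>
    have hdec : x :: t = List.replicate (1 + (t.takeWhile (· == x)).length) x
        ++ t.dropWhile (· == x) := by
      conv_lhs => rw [← List.takeWhile_append_dropWhile (p := (· == x)) (l := t)]
      rw [Nat.add_comm, List.replicate_succ, ← List.cons_append]
      congr 2
      exact takeWhile_eq_replicate x t
    conv_lhs => rw [hdec]
    rw [procA_run x _ _ (dropWhile_head_ne x t) g, chunkA_eq_bProcess,
      procA_eq_foldl (t.dropWhile (· == x)), bGroup_cons, List.foldl_cons]
  termination_by l.length
  decreasing_by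
    have := List.length_dropWhile_le (· == x) t
    simp; omega

-- ===== VERDICT (by name: the statement is the Claim_ definition above) =====
theorem get_gesture_seq_len_spec : Claim_equal_get_gesture_seq_len := by
  intro a _ _
  unfold Spec_get_gesture_seq_len get_gesture_seq_len get_gesture_seq_len_alt
  rw [outerA_eq_procA a 0 (List.replicate 11 []), List.drop_zero, procA_eq_foldl]
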